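-- pv_equiv track=rewrite | github.com/thdoering/Ampacity-eBOS-BOM-Generator | solar_bom/src/utils/string_allocation.py | compute_allocation_cycle
-- ===== SOURCE A (Python) =====
-- from typing import List, Dict, Any, Tuple
-- from math import gcd, ceil
--
-- def compute_allocation_cycle(strings_per_tracker: int, strings_per_inverter: int) -> List[List[int]]:
--     """
--     Compute the repeating inverter allocation cycle.
--
--     Each entry in the returned list represents one inverter's allocation pattern,
--     showing how many strings come from each consecutive tracker.
--
--     Args:
--         strings_per_tracker: Number of strings on each tracker (e.g., 3)
--         strings_per_inverter: Number of strings assigned to each inverter (e.g., 10)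
--
--     Returns:
--         List of inverter patterns. Each pattern is a list of ints showing
--         strings taken from consecutive trackers.
--
--     Example:
--         compute_allocation_cycle(3, 10) returns:
--         [[3, 3, 3, 1], [2, 3, 3, 2], [1, 3, 3, 3]]
--     """
--     if strings_per_tracker <= 0 or strings_per_inverter <= 0:
--         return []
--
--     # LCM determines when the pattern repeats
--     lcm = (strings_per_tracker * strings_per_inverter) // gcd(strings_per_tracker, strings_per_inverter)
--     total_strings_in_cycle = lcm
--     inverters_in_cycle = total_strings_in_cycle // strings_per_inverter
--     trackers_in_cycle = total_strings_in_cycle // strings_per_tracker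
--
--     # Walk through trackers, filling inverters
--     cycle = []
--     remaining_in_tracker = strings_per_tracker  # Strings left in current tracker
--
--     for inv_idx in range(inverters_in_cycle):
--         pattern = []
--         strings_needed = strings_per_inverter
--
--         while strings_needed > 0:
--             take = min(strings_needed, remaining_in_tracker)
--             pattern.append(take)
--             strings_needed -= take
--             remaining_in_tracker -= take
--
--             if remaining_in_tracker == 0:
--                 remaining_in_tracker = strings_per_tracker
--
--         cycle.append(pattern)
--
--     return cycle
-- ===== SOURCE B (Python) =====
-- from math import gcd
--
-- def compute_allocation_cycle(strings_per_tracker: int, strings_per_inverter: int):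
--     if strings_per_tracker <= 0 or strings_per_inverter <= 0:
--         return []
--     spt, spi = strings_per_tracker, strings_per_inverter
--     inverters_in_cycle = spt // gcd(spt, spi)
--     cycle = []
--     for i in range(inverters_in_cycle):
--         offset = (i * spi) % spt
--         first = min(spi, spt - offset)
--         rest = spi - first
--         k, m = divmod(rest, spt)
--         cycle.append([first] + [spt] * k + ([m] if m else []))
--     return cycle
-- ===== Notes on version B (the rewrite author's own statement) =====
-- stated objective: alternative
-- what changed: Instead of threading remaining_in_tracker across inverters with a nested while loop, B computes each inverter's pattern independently in closed form from its absolute offset ((i*spi) % spt): first chunk, then divmod gives the count of full trackers and the final remainder.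
import Mathlib
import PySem

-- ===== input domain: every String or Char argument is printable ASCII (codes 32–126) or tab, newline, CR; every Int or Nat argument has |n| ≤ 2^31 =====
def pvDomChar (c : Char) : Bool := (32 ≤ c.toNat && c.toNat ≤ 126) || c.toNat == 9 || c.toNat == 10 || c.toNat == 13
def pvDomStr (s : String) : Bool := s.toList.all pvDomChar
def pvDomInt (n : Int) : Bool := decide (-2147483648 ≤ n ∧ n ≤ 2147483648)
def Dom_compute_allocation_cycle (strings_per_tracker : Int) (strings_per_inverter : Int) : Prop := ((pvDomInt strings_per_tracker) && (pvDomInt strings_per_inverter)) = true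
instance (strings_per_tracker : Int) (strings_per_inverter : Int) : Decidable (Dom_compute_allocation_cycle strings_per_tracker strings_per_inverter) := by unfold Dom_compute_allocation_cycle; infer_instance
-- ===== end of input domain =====

-- B replaces A's stateful walk (remaining_in_tracker threaded through a nested while loop)
-- by an independent closed-form pattern per inverter computed from its absolute offset; objective: alternative decomposition, same cost.

-- ===== PORT A =====
-- A's inner `while strings_needed > 0` loop. Fuel = strings_needed.toNat is enough:
-- each pass takes at least 1 string while remaining ≥ 1; on fuel exhaustion (unreachable
-- under the proved invariant) it returns the state unchanged.
def pvInnerA (spt : Int) : Nat → Int → Int → List Int → List Int × Int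
  | 0, _, remaining, pattern => (pattern.reverse, remaining)
  | fuel+1, needed, remaining, pattern =>
    if needed > 0 then
      let take := min needed remaining
      pvInnerA spt fuel (needed - take)
        (if remaining - take = 0 then spt else remaining - take) (take :: pattern)
    else (pattern.reverse, remaining)

def compute_allocation_cycle (strings_per_tracker : Int) (strings_per_inverter : Int) : List (List Int) :=
  if strings_per_tracker ≤ 0 ∨ strings_per_inverter ≤ 0 then []
  else
    let lcm := PySem.Int.floordiv (strings_per_tracker * strings_per_inverter) (Int.gcd strings_per_tracker strings_per_inverter)
    let total_strings_in_cycle := lcm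
    let inverters_in_cycle := PySem.Int.floordiv total_strings_in_cycle strings_per_inverter
    let _trackers_in_cycle := PySem.Int.floordiv total_strings_in_cycle strings_per_tracker
    let res := (PySem.List.pyRange 0 inverters_in_cycle 1).foldl
      (fun st _ =>
        let pr := pvInnerA strings_per_tracker strings_per_inverter.toNat strings_per_inverter st.2 []
        (pr.1 :: st.1, pr.2))
      (([] : List (List Int)), strings_per_tracker)
    res.1.reverse

-- ===== PORT B =====
def pvPatternB (spt spi offset : Int) : List Int :=
  let first := min spi (spt - offset)
  let rest := spi - first
  let k := PySem.Int.floordiv rest spt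
  let m := PySem.Int.mod rest spt
  [first] ++ List.replicate k.toNat spt ++ (if m ≠ 0 then [m] else [])

def compute_allocation_cycle_alt (strings_per_tracker : Int) (strings_per_inverter : Int) : List (List Int) :=
  if strings_per_tracker ≤ 0 ∨ strings_per_inverter ≤ 0 then []
  else
    let inverters_in_cycle := PySem.Int.floordiv strings_per_tracker (Int.gcd strings_per_tracker strings_per_inverter)
    (List.range inverters_in_cycle.toNat).map
      (fun (i : Nat) => pvPatternB strings_per_tracker strings_per_inverter
        (PySem.Int.mod ((i : Int) * strings_per_inverter) strings_per_tracker))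

-- ===== PRECONDITION & SPEC =====
def Spec_compute_allocation_cycle (strings_per_tracker : Int) (strings_per_inverter : Int) (out : List (List Int)) : Prop := out = compute_allocation_cycle_alt strings_per_tracker strings_per_inverter
instance (strings_per_tracker : Int) (strings_per_inverter : Int) (out : List (List Int)) : Decidable (Spec_compute_allocation_cycle strings_per_tracker strings_per_inverter out) := by unfold Spec_compute_allocation_cycle; infer_instance

-- ===== CLAIM (what is proved, stated in full; the proofs are below) =====
def Claim_equal_compute_allocation_cycle : Prop := ∀ (strings_per_tracker : Int) (strings_per_inverter : Int), Dom_compute_allocation_cycle strings_per_tracker strings_per_inverter → Spec_compute_allocation_cycle strings_per_tracker strings_per_inverter (compute_allocation_cycle strings_per_tracker strings_per_inverter)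

-- ===== LEMMAS AND PROOFS =====

lemma pvInnerA_nonpos (spt : Int) (fuel : Nat) (needed r : Int) (acc : List Int) (h : needed ≤ 0) :
    pvInnerA spt fuel needed r acc = (acc.reverse, r) := by
  cases fuel with
  | zero => rfl
  | succ n => simp [pvInnerA, show ¬ needed > 0 by omega]

lemma pvPatternB_pos (spt spi offset : Int) (h : 0 < spt) :
    pvPatternB spt spi offset =
      [min spi (spt - offset)] ++
        List.replicate ((spi - min spi (spt - offset)) / spt).toNat spt ++
        (if (spi - min spi (spt - offset)) % spt ≠ 0 then [(spi - min spi (spt - offset)) % spt] else []) := by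
  simp only [pvPatternB, PySem.Int.floordiv_eq_ediv_of_pos h, PySem.Int.mod_eq_emod_of_pos h]

lemma pvInnerA_closed (spt : Int) (hspt : 1 ≤ spt) :
    ∀ (fuel : Nat) (needed r : Int) (acc : List Int), 1 ≤ needed → needed.toNat ≤ fuel → 1 ≤ r → r ≤ spt →
    pvInnerA spt fuel needed r acc =
      (acc.reverse ++ pvPatternB spt needed (spt - r), spt - ((spt - r + needed) % spt)) := by
  intro fuel
  induction fuel with
  | zero => intro needed r acc h1 h2 _ _; omega
  | succ fuel ih =>
    intro needed r acc h1 h2 hr1 hr2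
    rw [pvInnerA, if_pos (by omega)]
    by_cases hc : needed ≤ r
    · -- take = needed: one chunk finishes the inverter
      have hmin : min needed r = needed := by omega
      simp only [hmin, sub_self]
      rw [pvInnerA_nonpos _ _ _ _ _ (by omega)]
      have hminP : min needed (spt - (spt - r)) = needed := by omega
      rw [pvPatternB_pos _ _ _ (by omega), hminP]
      simp only [sub_self, Int.zero_ediv, Int.zero_emod, Int.toNat_zero, List.replicate_zero,
        ne_eq, not_true_eq_false, if_neg, List.append_nil, List.nil_append, List.reverse_cons]
      by_cases hz : r - needed = 0
      · have h0 : spt - r + needed = spt := by omega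
        simp [hz, h0, Int.emod_self]
      · have hlt : (spt - r + needed) % spt = spt - r + needed :=
          Int.emod_eq_of_lt (by omega) (by omega)
        rw [if_neg hz, hlt]
        simp only [Prod.mk.injEq]
        exact ⟨by simp, by omega⟩
    · -- take = r: tracker exhausted, reset to spt and recurse
      have hmin : min needed r = r := by omega
      simp only [hmin, sub_self, reduceIte]
      rw [ih (needed - r) spt (r :: acc) (by omega) (by omega) (by omega) (by omega)]
      have hrem : (spt - r + needed) % spt = (needed - r) % spt := by
        rw [show spt - r + needed = (needed - r) + spt by ring, Int.add_emod_right]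
      have hsub : spt - spt = (0 : Int) := by ring
      rw [hsub, hrem]
      refine Prod.ext ?_ (by simp)
      -- pattern equality
      rw [List.reverse_cons, List.append_assoc, List.singleton_append]
      congr 1
      rw [pvPatternB_pos _ _ _ (by omega), pvPatternB_pos _ _ _ (by omega)]
      have hminL : min needed (spt - (spt - r)) = r := by omega
      rw [hminL]
      set d := needed - r with hd
      have hd1 : 1 ≤ d := by omega
      by_cases hds : d < spt
      · -- recursion lands in its single-chunk case
        have hminR : min d (spt - 0) = d := by omega
        rw [hminR]
        have hdiv : d / spt = 0 := Int.ediv_eq_zero_of_lt (by omega) (by omega)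
        have hmod : d % spt = d := Int.emod_eq_of_lt (by omega) (by omega)
        simp [hdiv, hmod, show d ≠ 0 by omega]
      · -- d ≥ spt: recursion takes a full tracker first
        have hminR : min d (spt - 0) = spt := by omega
        rw [hminR]
        have hdiv : d / spt = (d - spt) / spt + 1 := by
          conv_lhs => rw [show d = (d - spt) + 1 * spt by ring]
          rw [Int.add_mul_ediv_right _ _ (show spt ≠ 0 by omega)]
        have hmod : d % spt = (d - spt) % spt := by
          conv_lhs => rw [show d = (d - spt) + spt by ring]
          rw [Int.add_emod_right]
        have hk0 : 0 ≤ (d - spt) / spt := Int.ediv_nonneg (by omega) (by omega)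
        have htn : (d / spt).toNat = ((d - spt) / spt).toNat + 1 := by
          rw [hdiv]; omega
        rw [hmod, htn, List.replicate_succ]
        simp

lemma pv_outer (spt spi : Int) (hspt : 1 ≤ spt) (hspi : 1 ≤ spi) :
    ∀ (l : List Int) (j : Nat) (acc : List (List Int)),
    l.foldl
      (fun st _ =>
        let pr := pvInnerA spt spi.toNat spi st.2 []
        (pr.1 :: st.1, pr.2))
      (acc, spt - ((j : Int) * spi % spt))
    = (((List.range l.length).map
          (fun i => pvPatternB spt spi (((j + i : Nat) : Int) * spi % spt))).reverse ++ acc,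
       spt - (((j + l.length : Nat) : Int) * spi % spt)) := by
  intro l
  induction l with
  | nil => intro j acc; simp
  | cons x l ihl =>
    intro j acc
    have hmod0 : 0 ≤ (j : Int) * spi % spt := Int.emod_nonneg _ (by omega)
    have hmod1 : (j : Int) * spi % spt < spt := Int.emod_lt_of_pos _ (by omega)
    rw [List.foldl_cons]
    simp only
    rw [pvInnerA_closed spt hspt spi.toNat spi _ [] hspi (le_refl _) (by omega) (by omega)]
    have hoff : spt - (spt - (j : Int) * spi % spt) = (j : Int) * spi % spt := by ring
    have hrem : ((j : Int) * spi % spt + spi) % spt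
        = ((j + 1 : Nat) : Int) * spi % spt := by
      rw [Int.emod_add_emod]
      push_cast
      ring_nf
    simp only [List.reverse_nil, List.nil_append]
    rw [hoff, hrem, ihl (j + 1) _]
    simp only [Prod.mk.injEq, List.length_cons]
    constructor
    · rw [List.range_succ_eq_map, List.map_cons, List.map_map, List.reverse_cons,
          List.append_assoc, List.singleton_append]
      congr 1
      · congr 1
        apply List.map_congr_left
        intro i _
        simp only [Function.comp_apply]
        congr 1
        push_cast
        ring
    · have hjl : j + 1 + l.length = j + (l.length + 1) := by omega
      rw [hjl]

lemma pv_count (spt spi : Int) (hspt : 1 ≤ spt) (hspi : 1 ≤ spi) :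
    PySem.Int.floordiv
        (PySem.Int.floordiv (spt * spi) (Int.gcd spt spi)) spi
      = PySem.Int.floordiv spt (Int.gcd spt spi) := by
  have hg : 0 < ((Int.gcd spt spi : Nat) : Int) := by
    have := Int.gcd_pos_of_ne_zero_left spi (show spt ≠ 0 by omega)
    exact_mod_cast this
  rw [PySem.Int.floordiv_eq_ediv_of_pos hg, PySem.Int.floordiv_eq_ediv_of_pos hg,
      PySem.Int.floordiv_eq_ediv_of_pos (show (0:Int) < spi by omega)]
  obtain ⟨t, ht⟩ := Int.gcd_dvd_left (a := spt) (b := spi)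
  set g : Int := ((Int.gcd spt spi : Nat) : Int) with hgdef
  rw [ht, show g * t * spi = g * (t * spi) by ring,
      Int.mul_ediv_cancel_left _ (by omega), Int.mul_ediv_cancel _ (by omega),
      Int.mul_ediv_cancel_left _ (by omega)]

-- ===== VERDICT (by name: the statement is the Claim_ definition above) =====
theorem compute_allocation_cycle_spec : Claim_equal_compute_allocation_cycle := by
  intro spt spi _
  unfold Spec_compute_allocation_cycle compute_allocation_cycle compute_allocation_cycle_alt
  by_cases hneg : spt ≤ 0 ∨ spi ≤ 0
  · rw [if_pos hneg, if_pos hneg]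
  · rw [if_neg hneg, if_neg hneg]
    push_neg at hneg
    obtain ⟨h1, h2⟩ := hneg
    simp only
    rw [pv_count spt spi (by omega) (by omega)]
    set n := PySem.Int.floordiv spt (Int.gcd spt spi) with hn
    have h0 : spt - ((0 : Nat) : Int) * spi % spt = spt := by simp
    have := pv_outer spt spi (by omega) (by omega) (PySem.List.pyRange 0 n 1) 0 []
    rw [h0] at this
    rw [this]
    simp only [List.append_nil, List.reverse_reverse]
    rw [PySem.List.length_pyRange_one]
    simp only [Int.sub_zero]
    apply List.map_congr_left
    intro i _
    rw [PySem.Int.mod_eq_emod_of_pos (show (0:Int) < spt by omega)]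
    simp
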